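-- pv_equiv track=rewrite | github.com/y4sh-codes/DSA-online-platforms | Difficulty: Basic/Average Count Array/average-count-array.py | countArray
-- ===== SOURCE A (Python) =====
-- def countArray (arr, x) :
--     #Complete the function
--     freq = {}
--
--     average = 0
--     n = len(arr)
--     arr2 = [0]*n
--
--     for i in arr:
--         freq[i] = freq.get(i, 0) + 1
--
--     for i in range(n):
--         average = (arr[i]+x)//2
--
--         arr2[i] = freq.get(average, 0)
--
--     return arr2
-- ===== SOURCE B (Python) =====
-- def countArray(arr, x):
--     # Sort a copy once, then count each element's average via two binary searches
--     # (bisect_left / bisect_right bounds in the sorted list).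
--     s = sorted(arr)
--     res = []
--     for e in arr:
--         t = (e + x) // 2
--         lo, hi = 0, len(s)          # bisect_left for t
--         while lo < hi:
--             mid = (lo + hi) // 2
--             if s[mid] < t:
--                 lo = mid + 1
--             else:
--                 hi = mid
--         left = lo
--         lo, hi = 0, len(s)          # bisect_right for t
--         while lo < hi:
--             mid = (lo + hi) // 2
--             if t < s[mid]:
--                 hi = mid
--             else:
--                 lo = mid + 1
--         res.append(lo - left)
--     return res
-- ===== Notes on version B (the rewrite author's own statement) =====
-- stated objective: alternative
-- what changed: Replaced the frequency dictionary with sort-then-binary-search: arr is sorted once and each element's average count is obtained as bisect_right minus bisect_left in the sorted copy.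
import Mathlib
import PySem

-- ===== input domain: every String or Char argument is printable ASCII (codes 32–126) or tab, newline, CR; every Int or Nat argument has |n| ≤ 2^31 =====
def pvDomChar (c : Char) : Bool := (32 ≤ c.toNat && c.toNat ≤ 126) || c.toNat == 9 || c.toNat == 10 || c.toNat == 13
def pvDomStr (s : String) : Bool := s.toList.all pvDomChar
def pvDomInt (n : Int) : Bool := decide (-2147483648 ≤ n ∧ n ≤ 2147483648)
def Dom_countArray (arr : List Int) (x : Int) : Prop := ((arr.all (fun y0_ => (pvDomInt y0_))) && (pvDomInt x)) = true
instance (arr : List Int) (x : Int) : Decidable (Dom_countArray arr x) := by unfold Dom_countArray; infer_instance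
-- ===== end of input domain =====

-- B replaces A's frequency dictionary with sort-then-binary-search (bisect bounds); alternative algorithm, not faster.

-- ===== PORT A =====
def countArray (arr : List Int) (x : Int) : List Int :=
  let freq : PySem.Dict Int Int :=
    arr.foldl (fun d i => d.insert i (d.getD i 0 + 1)) PySem.Dict.empty
  let n : Int := arr.length
  let arr2 : List Int := List.replicate n.toNat 0
  (PySem.List.pyRange 0 n 1).foldl
    (fun a2 i =>
      let average := PySem.Int.floordiv (PySem.List.pyGetD arr i 0 + x) 2
      a2.set i.toNat (freq.getD average 0)) arr2

-- ===== PORT B =====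
-- Source B's hand-written while-loops are exactly Python's bisect_left/bisect_right; they are
-- ported as the PySem primitives of the same algorithm (lo/hi halving on the sorted copy).
def countArray_alt (arr : List Int) (x : Int) : List Int :=
  let s := PySem.List.sorted arr (fun v => v) false
  arr.foldl (fun res e =>
    let t := PySem.Int.floordiv (e + x) 2
    let left := PySem.List.bisectLeft s t
    let right := PySem.List.bisectRight s t
    res ++ [((right : Int) - (left : Int))]) []

-- ===== PRECONDITION & SPEC =====
def Spec_countArray (arr : List Int) (x : Int) (out : List Int) : Prop := out = countArray_alt arr x
instance (arr : List Int) (x : Int) (out : List Int) : Decidable (Spec_countArray arr x out) := by unfold Spec_countArray; infer_instance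

-- ===== CLAIM =====
def Claim_equal_countArray : Prop := ∀ (arr : List Int) (x : Int), Dom_countArray arr x → Spec_countArray arr x (countArray arr x)

-- ===== LEMMAS AND PROOFS =====

-- A's index-writing loop over range(n) fills replicate-0 with f applied to each element.
theorem pv_loop_set (f : Int → Int) (arr : List Int) (d : Int) :
    ∀ (m k : Nat) (acc : List Int), arr.length - k = m → acc.length = arr.length →
      (PySem.List.pyRange (k : Int) (arr.length : Int) 1).foldl
        (fun a2 i => a2.set i.toNat (f (PySem.List.pyGetD arr i d))) acc
      = acc.take k ++ (arr.drop k).map f := by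
  intro m
  induction m with
  | zero =>
    intro k acc hm hl
    have hk : arr.length ≤ k := by omega
    rw [PySem.List.pyRange_one_eq_nil (by exact_mod_cast hk)]
    simp [List.drop_eq_nil_of_le hk, List.take_of_length_le (show acc.length ≤ k by omega)]
  | succ m ih =>
    intro k acc hm hl
    have hk : k < arr.length := by omega
    rw [PySem.List.pyRange_one_cons (by exact_mod_cast hk)]
    simp only [List.foldl_cons, Int.toNat_natCast]
    have h1 : ((k : Int) + 1) = ((k + 1 : Nat) : Int) := by push_cast; ring
    have hget : PySem.List.pyGetD arr (k : Int) d = arr[k] := by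
      rw [PySem.List.pyGetD_natCast]
      simp [hk]
    rw [h1, hget, ih (k + 1) _ (by omega) (by simp [hl])]
    have hset : (acc.set k (f arr[k])).take (k + 1) = acc.take k ++ [f arr[k]] := by
      rw [List.set_eq_take_append_cons_drop, if_pos (show k < acc.length by omega),
        List.take_append]
      simp [List.length_take, Nat.min_eq_left (le_of_lt (show k < acc.length by omega))]
    rw [hset, List.drop_eq_getElem_cons hk]
    simp only [List.map_cons, List.append_assoc, List.singleton_append, List.map_drop]

-- a countP characterised by an index threshold: first k positions satisfy p, the rest do not
theorem pv_countP_prefix (p : Int → Bool) (s : List Int) (k : Nat) (hk : k ≤ s.length)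
    (h1 : ∀ j (hj : j < s.length), j < k → p s[j] = true)
    (h2 : ∀ j (hj : j < s.length), k ≤ j → p s[j] ≠ true) : s.countP p = k := by
  conv_lhs => rw [← List.take_append_drop k s]
  rw [List.countP_append]
  have ht : (s.take k).countP p = (s.take k).length := by
    rw [List.countP_eq_length]
    intro a ha
    obtain ⟨j, hm, rfl⟩ := List.mem_take_iff_getElem.mp ha
    exact h1 j (by omega) (by omega)
  have hd : (s.drop k).countP p = 0 := by
    rw [List.countP_eq_zero]
    intro a ha
    obtain ⟨j, hm, rfl⟩ := List.mem_drop_iff_getElem.mp ha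
    exact h2 (k + j) (by omega) (by omega)
  rw [ht, hd, List.length_take]
  omega

theorem pv_countP_le_split (s : List Int) (t : Int) :
    s.countP (fun v => decide (v ≤ t)) = s.countP (fun v => decide (v < t)) + s.count t := by
  induction s with
  | nil => simp
  | cons a s ih =>
    simp only [List.countP_cons, List.count_cons, ih]
    by_cases h : a = t <;> by_cases h2 : a < t <;> simp [h, h2, le_of_lt] <;> omega

-- bisect bounds on the sorted copy give the count
theorem pv_bisect_count (s : List Int) (hs : s.Pairwise (fun a b => a ≤ b)) (t : Int) :
    ((PySem.List.bisectRight s t : Int)) - ((PySem.List.bisectLeft s t : Int)) = (s.count t : Int) := by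
  obtain ⟨hl1, hl2, hl3⟩ := PySem.List.bisectLeft_spec s t hs
  obtain ⟨hr1, hr2, hr3⟩ := PySem.List.bisectRight_spec s t hs
  have hL : s.countP (fun v => decide (v < t)) = PySem.List.bisectLeft s t := by
    apply pv_countP_prefix _ _ _ hl1
    · intro j hj hjk; simpa using hl2 j hj hjk
    · intro j hj hjk; simpa using not_lt.mpr (hl3 j hj hjk)
  have hR : s.countP (fun v => decide (v ≤ t)) = PySem.List.bisectRight s t := by
    apply pv_countP_prefix _ _ _ hr1
    · intro j hj hjk; simpa using hr2 j hj hjk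
    · intro j hj hjk; simpa using not_le.mpr (hr3 j hj hjk)
  have := pv_countP_le_split s t
  omega

theorem countArray_alt_eq_map (arr : List Int) (x : Int) :
    countArray_alt arr x
      = arr.map (fun e => (arr.count (PySem.Int.floordiv (e + x) 2) : Int)) := by
  unfold countArray_alt
  rw [PySem.List.foldl_append_singleton_eq_map]
  simp only [List.nil_append]
  apply List.map_congr_left
  intro e _
  have hperm := PySem.List.sorted_perm arr (fun v => v) false
  have hpw := PySem.List.sorted_pairwise arr (fun v => v)
  rw [pv_bisect_count _ hpw, hperm.count_eq]

theorem countArray_eq (arr : List Int) (x : Int) : countArray arr x = countArray_alt arr x := by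
  rw [countArray_alt_eq_map]
  unfold countArray
  simp only [PySem.Dict.getD_foldl_insert_add_one, PySem.Dict.getD_empty, zero_add]
  simp only [Int.toNat_natCast]
  have h := pv_loop_set (fun e => (arr.count (PySem.Int.floordiv (e + x) 2) : Int)) arr 0
    arr.length 0 (List.replicate arr.length 0) (by omega) (by simp)
  simpa using h

-- ===== VERDICT =====
theorem countArray_spec : Claim_equal_countArray := by
  intro arr x _
  unfold Spec_countArray
  exact countArray_eq arr x
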